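-- pv_equiv track=rewrite | github.com/meerachotai/infer_migration | ML/transform_matrix.py | getNewOrder
-- ===== SOURCE A (Python) =====
-- def getNewOrder(numPopEW, numPopNS,transform='mirror'):
--     newOrder = []
--     # set new order for mirror - 5 4 3 2 1; 10 9 8 7 6; 15, 14 13...
--     if(transform == 'mirror'):
--         for i in range(numPopNS):
--             for j in range(numPopEW, 0, -1):
--                 cur = (i * numPopEW) + j
--                 newOrder.append(cur)
--     # set new order for rotation: 5 10 15 20 25; 4 9 14 19 24; 3 8 13 18 23...
--     elif(transform == 'rotate'):
--         for i in range(numPopEW):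
--             for j in range(1,numPopNS+1):
--                 cur = (j*numPopEW) - i
--                 newOrder.append(cur)
--     return newOrder
-- ===== SOURCE B (Python) =====
-- def _grid(numPopEW, numPopNS):
--     # base grid: row i holds i*numPopEW+1 .. i*numPopEW+numPopEW
--     return [list(range(i * numPopEW + 1, i * numPopEW + numPopEW + 1))
--             for i in range(numPopNS)]
--
-- def getNewOrder(numPopEW, numPopNS, transform='mirror'):
--     if transform == 'mirror':
--         # each row reversed, rows in order
--         return [x for row in _grid(numPopEW, numPopNS) for x in reversed(row)]
--     if transform == 'rotate':
--         # read the grid column-wise, last column first, top to bottom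
--         grid = _grid(numPopEW, numPopNS)
--         return [row[c] for c in range(numPopEW - 1, -1, -1) for row in grid]
--     return []
-- ===== Notes on version B (the rewrite author's own statement) =====
-- stated objective: alternative
-- what changed: B first materializes the 2D grid as a list of rows of consecutive integers and then produces the output by traversing that structure (reversing each row for 'mirror', reading columns last-to-first for 'rotate'), instead of A's nested index loops computing each entry arithmetically.
import Mathlib
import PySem

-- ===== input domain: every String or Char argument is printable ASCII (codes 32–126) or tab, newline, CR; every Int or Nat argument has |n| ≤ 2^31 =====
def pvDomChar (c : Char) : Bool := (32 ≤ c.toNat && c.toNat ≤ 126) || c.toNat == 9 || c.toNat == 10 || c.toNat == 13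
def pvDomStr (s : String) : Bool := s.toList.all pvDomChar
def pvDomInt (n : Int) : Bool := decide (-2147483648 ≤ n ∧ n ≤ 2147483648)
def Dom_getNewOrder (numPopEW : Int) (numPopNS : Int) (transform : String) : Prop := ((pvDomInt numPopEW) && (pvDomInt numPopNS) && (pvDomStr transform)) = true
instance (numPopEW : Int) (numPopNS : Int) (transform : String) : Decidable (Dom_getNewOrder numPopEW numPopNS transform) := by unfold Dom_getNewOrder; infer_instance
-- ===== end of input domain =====

-- B materializes the grid rows and traverses them (reversed rows / column-wise) instead of A's direct
-- double-loop arithmetic; objective: alternative decomposition, same cost. A mutates nothing.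

-- ===== PORT A =====
def getNewOrder (numPopEW : Int) (numPopNS : Int) (transform : String) : List Int :=
  -- newOrder = []; two nested append loops, branch order as in A
  if transform = "mirror" then
    (PySem.List.pyRange 0 numPopNS 1).foldl (fun acc i =>
      (PySem.List.pyRange numPopEW 0 (-1)).foldl (fun acc2 j =>
        acc2 ++ [i * numPopEW + j]) acc) []
  else if transform = "rotate" then
    (PySem.List.pyRange 0 numPopEW 1).foldl (fun acc i =>
      (PySem.List.pyRange 1 (numPopNS + 1) 1).foldl (fun acc2 j =>
        acc2 ++ [j * numPopEW - i]) acc) []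
  else []

-- ===== PORT B =====
-- grid row i = list(range(i*EW+1, i*EW+EW+1)); mirror = rows with each row reversed;
-- rotate = column-wise read, last column first.  row[c] is ported as pyGetD (the index
-- 0 ≤ c < numPopEW is always in range, so Python never raises and the default is dead).
def pvGrid (numPopEW : Int) (numPopNS : Int) : List (List Int) :=
  (PySem.List.pyRange 0 numPopNS 1).map (fun i =>
    PySem.List.pyRange (i * numPopEW + 1) (i * numPopEW + numPopEW + 1) 1)

def getNewOrder_alt (numPopEW : Int) (numPopNS : Int) (transform : String) : List Int :=
  if transform = "mirror" then
    (pvGrid numPopEW numPopNS).flatMap (fun row => row.reverse)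
  else if transform = "rotate" then
    (PySem.List.pyRange (numPopEW - 1) (-1) (-1)).flatMap (fun c =>
      (pvGrid numPopEW numPopNS).map (fun row => PySem.List.pyGetD row c 0))
  else []

-- ===== PRECONDITION & SPEC =====
def Spec_getNewOrder (numPopEW : Int) (numPopNS : Int) (transform : String) (out : List Int) : Prop := out = getNewOrder_alt numPopEW numPopNS transform
instance (numPopEW : Int) (numPopNS : Int) (transform : String) (out : List Int) : Decidable (Spec_getNewOrder numPopEW numPopNS transform out) := by unfold Spec_getNewOrder; infer_instance

-- ===== CLAIM (what is proved, stated in full; the proofs are below) =====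
def Claim_equal_getNewOrder : Prop := ∀ (numPopEW : Int) (numPopNS : Int) (transform : String), Dom_getNewOrder numPopEW numPopNS transform → Spec_getNewOrder numPopEW numPopNS transform (getNewOrder numPopEW numPopNS transform)

-- ===== LEMMAS AND PROOFS =====

-- map (c + ·) over a unit range shifts its endpoints
lemma pyRange_map_add (a b c : Int) :
    (PySem.List.pyRange a b 1).map (fun j => c + j) = PySem.List.pyRange (c + a) (c + b) 1 := by
  have h : c + b - (c + a) = b - a := by ring
  simp [PySem.List.pyRange_one, h, List.map_map]
  intro k _
  ring

-- A's mirror row equals B's reversed grid row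
lemma mirror_row (ew i : Int) :
    (PySem.List.pyRange (i * ew + 1) (i * ew + ew + 1) 1).reverse
      = (PySem.List.pyRange ew 0 (-1)).map (fun j => i * ew + j) := by
  rw [PySem.List.pyRange_neg_one_eq_reverse]
  simp only [List.map_reverse, pyRange_map_add]
  norm_num
  congr 1
  ring

-- B's countdown of columns is A's outer index sent through c = ew-1-i
lemma countdown_cols (ew : Int) :
    PySem.List.pyRange (ew - 1) (-1) (-1)
      = (PySem.List.pyRange 0 ew 1).map (fun i => ew - 1 - i) := by
  rw [PySem.List.pyRange_neg_one, PySem.List.pyRange_one]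
  have h : ew - 1 - (-1) = ew - 0 := by ring
  rw [h, List.map_map]
  exact List.map_congr_left (fun k _ => by simp [Function.comp])

-- reading column ew-1-i of the grid, top to bottom, is A's inner rotate loop
lemma rotate_col (ew ns i : Int) (h0 : 0 ≤ i) (h1 : i < ew) :
    ((PySem.List.pyRange 0 ns 1).map (fun r =>
        PySem.List.pyRange (r * ew + 1) (r * ew + ew + 1) 1)).map
      (fun row => PySem.List.pyGetD row (ew - 1 - i) 0)
      = (PySem.List.pyRange 1 (ns + 1) 1).map (fun j => j * ew - i) := by
  rw [List.map_map]
  rw [PySem.List.pyRange_one 0 ns, PySem.List.pyRange_one 1 (ns + 1)]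
  have h : ns + 1 - 1 = ns - 0 := by ring
  rw [h, List.map_map, List.map_map]
  refine List.map_congr_left (fun k _ => ?_)
  simp only [Function.comp]
  have hlen : ((0 : Int) + k) * ew + ew + 1 - ((0 + k) * ew + 1) = ew := by ring
  have hget : PySem.List.pyGetD
      (PySem.List.pyRange (((0:Int) + k) * ew + 1) ((0 + k) * ew + ew + 1) 1) (ew - 1 - i) 0
      = ((0:Int) + k) * ew + 1 + (ew - 1 - i) := by
    rw [PySem.List.pyGetD_eq_getElem]
    · rw [PySem.List.getElem_pyRange_one]
      omega
    · omega
    · rw [PySem.List.length_pyRange_one, hlen]; omega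
  rw [hget]; ring

theorem getNewOrder_spec : Claim_equal_getNewOrder := by
  intro ew ns t _
  unfold Spec_getNewOrder getNewOrder getNewOrder_alt pvGrid
  by_cases hm : t = "mirror"
  · simp only [hm, if_pos]
    simp only [PySem.List.foldl_append_singleton_eq_map, PySem.List.foldl_append_eq_flatMap,
      List.nil_append, List.flatMap_map]
    exact List.flatMap_congr (fun i _ => (mirror_row ew i).symm)
  · by_cases hr : t = "rotate"
    · simp only [hr, reduceIte]
      simp only [PySem.List.foldl_append_singleton_eq_map, PySem.List.foldl_append_eq_flatMap,
        List.nil_append, countdown_cols, List.flatMap_map]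
      refine List.flatMap_congr (fun i hi => ?_)
      rw [PySem.List.mem_pyRange_one] at hi
      exact (rotate_col ew ns i hi.1 hi.2).symm
    · simp [hm, hr]
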